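-- pv_equiv track=rewrite | github.com/YOONLEEVERSE/REAL-algorithm | yjh/2025/04/06/solution2.py | solution
-- ===== SOURCE A (Python) =====
-- def solution(nodes, edges):
--     parents = []
--     degrees = []
--     root_groups = []
--     non_root_groups = []
--     nodes_idx = {}
--
--     def find_parent(node_idx):
--         if parents[node_idx] != node_idx:
--             parents[node_idx] = find_parent(parents[node_idx])
--         return parents[node_idx]
--
--     def union_parent(a, b):
--         a = find_parent(a)
--         b = find_parent(b)
--         if a != b:
--             parents[b] = a
--
--     for i, node in enumerate(nodes):
--         parents.append(i)
--         degrees.append(0)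
--         root_groups.append(0)
--         non_root_groups.append(0)
--         nodes_idx[node] = i
--
--     for edge in edges:
--         u = nodes_idx[edge[0]]
--         v = nodes_idx[edge[1]]
--         degrees[u] += 1
--         degrees[v] += 1
--
--     for edge in edges:
--         u = nodes_idx[edge[0]]
--         v = nodes_idx[edge[1]]
--         union_parent(u, v)
--
--     for i in range(len(nodes)):
--         parent = find_parent(i)
--         if nodes[i] % 2 == degrees[i] % 2:
--             root_groups[parent] += 1
--         else:
--             non_root_groups[parent] += 1
--
--     normal, reverse = 0, 0
--     for i in range(len(nodes)):
--         if find_parent(i) != i: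
--             continue
--         if root_groups[i] == 1:
--             normal += 1
--         if non_root_groups[i] == 1:
--             reverse += 1
--
--     return normal, reverse
-- ===== SOURCE B (Python) =====
-- def solution(nodes, edges):
--     # merge-by-relabel component labels instead of a union-find forest; one pass over edges
--     n = len(nodes)
--     idx = {}
--     for i, node in enumerate(nodes):
--         idx[node] = i
--     degrees = [0] * n
--     labels = list(range(n))
--     for a, b in edges:
--         u = idx[a]
--         v = idx[b]
--         degrees[u] += 1
--         degrees[v] += 1
--         la, lb = labels[u], labels[v]
--         if la != lb:
--             labels = [la if x == lb else x for x in labels]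
--     root_cnt = [0] * n
--     non_cnt = [0] * n
--     for i in range(n):
--         l = labels[i]
--         if nodes[i] % 2 == degrees[i] % 2:
--             root_cnt[l] += 1
--         else:
--             non_cnt[l] += 1
--     normal, reverse = 0, 0
--     for i in range(n):
--         if labels[i] == i:
--             if root_cnt[i] == 1:
--                 normal += 1
--             if non_cnt[i] == 1:
--                 reverse += 1
--     return normal, reverse
-- ===== Notes on version B (the rewrite author's own statement) =====
-- stated objective: alternative
-- what changed: Replaces the union-find forest with path compression and two extra edge passes by a single edge pass that merges connected components via label relabelling (plus degree counting in the same pass), then tallies parity per label.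
import Mathlib
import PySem

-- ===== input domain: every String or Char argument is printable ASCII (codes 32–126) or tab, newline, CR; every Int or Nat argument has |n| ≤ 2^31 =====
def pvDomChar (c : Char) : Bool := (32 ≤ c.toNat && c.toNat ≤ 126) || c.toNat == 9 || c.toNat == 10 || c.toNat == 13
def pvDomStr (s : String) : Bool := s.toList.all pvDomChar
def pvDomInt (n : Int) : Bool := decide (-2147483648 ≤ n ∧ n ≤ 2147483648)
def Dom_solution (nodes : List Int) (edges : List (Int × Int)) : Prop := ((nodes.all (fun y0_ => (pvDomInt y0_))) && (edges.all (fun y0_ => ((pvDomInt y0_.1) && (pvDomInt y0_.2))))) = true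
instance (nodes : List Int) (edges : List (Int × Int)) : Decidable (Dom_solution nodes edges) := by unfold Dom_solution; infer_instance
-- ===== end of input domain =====

-- B replaces A's union-find forest (find with path compression + three extra passes) by a
-- single edge pass that merges component labels by relabelling; same return value on Pre_.

-- ===== PORT A =====

-- last-wins dict node -> index (shared by both Pythons verbatim)
def pvIdx (nodes : List Int) : PySem.Dict Int Nat :=
  (nodes.foldl (fun st x => (st.1.insert x st.2, st.2 + 1))
    ((PySem.Dict.empty : PySem.Dict Int Nat), 0)).1

-- nodes_idx[edge[k]]; the `getD 0` default is only reachable outside Pre_ (KeyError in Python)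
def pvLook (idx : PySem.Dict Int Nat) (x : Int) : Nat := (idx.get? x).getD 0

-- find_parent with path compression; fuel (= list length at call sites) only makes the
-- Python recursion structural — it is never exhausted on states A actually builds
def pvFind : List Nat → Nat → Nat → Nat × List Nat
  | p, i, 0 => (p.getD i 0, p)
  | p, i, (fuel+1) =>
      if p.getD i 0 ≠ i then
        let r := pvFind p (p.getD i 0) fuel
        let p' := r.2.set i r.1
        (p'.getD i 0, p')
      else (p.getD i 0, p)

def pvUnion (p : List Nat) (a b : Nat) : List Nat :=
  let fa := pvFind p a p.length
  let fb := pvFind fa.2 b fa.2.length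
  if fa.1 ≠ fb.1 then fb.2.set fb.1 fa.1 else fb.2

def pvDegrees (idx : PySem.Dict Int Nat) (n : Nat) (edges : List (Int × Int)) : List Int :=
  edges.foldl (fun dg e =>
      let u := pvLook idx e.1
      let v := pvLook idx e.2
      let dg := dg.set u (dg.getD u 0 + 1)
      dg.set v (dg.getD v 0 + 1)) (List.replicate n 0)

def pvUnions (idx : PySem.Dict Int Nat) (n : Nat) (edges : List (Int × Int)) : List Nat :=
  edges.foldl (fun p e => pvUnion p (pvLook idx e.1) (pvLook idx e.2)) (List.range n)

def pvTally (nodes degrees : List Int) (n : Nat) (parents : List Nat) :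
    List Nat × List Int × List Int :=
  (List.range n).foldl (fun st i =>
      let f := pvFind st.1 i n
      if PySem.Int.mod (nodes.getD i 0) 2 = PySem.Int.mod (degrees.getD i 0) 2 then
        (f.2, st.2.1.set f.1 (st.2.1.getD f.1 0 + 1), st.2.2)
      else
        (f.2, st.2.1, st.2.2.set f.1 (st.2.2.getD f.1 0 + 1)))
    (parents, List.replicate n 0, List.replicate n 0)

def pvCollect (n : Nat) (rg ng : List Int) (p : List Nat) : List Nat × Int × Int :=
  (List.range n).foldl (fun st i =>
      let f := pvFind st.1 i n
      if f.1 ≠ i then (f.2, st.2.1, st.2.2)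
      else (f.2, (if rg.getD i 0 = 1 then st.2.1 + 1 else st.2.1),
                 (if ng.getD i 0 = 1 then st.2.2 + 1 else st.2.2)))
    (p, 0, 0)

def solution (nodes : List Int) (edges : List (Int × Int)) : Int × Int :=
  let n := nodes.length
  let idx := pvIdx nodes
  let degrees := pvDegrees idx n edges
  let parents := pvUnions idx n edges
  let s4 := pvTally nodes degrees n parents
  let s5 := pvCollect n s4.2.1 s4.2.2 s4.1
  (s5.2.1, s5.2.2)

-- ===== PORT B =====
def pvMerge (idx : PySem.Dict Int Nat) (n : Nat) (edges : List (Int × Int)) :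
    List Int × List Nat :=
  edges.foldl (fun st e =>
      let u := pvLook idx e.1
      let v := pvLook idx e.2
      let dg := st.1.set u (st.1.getD u 0 + 1)
      let dg := dg.set v (dg.getD v 0 + 1)
      let la := st.2.getD u 0
      let lb := st.2.getD v 0
      (dg, if la ≠ lb then st.2.map (fun x => if x = lb then la else x) else st.2))
    (List.replicate n 0, List.range n)

def pvCount (nodes degrees : List Int) (labels : List Nat) (n : Nat) : List Int × List Int :=
  (List.range n).foldl (fun c i =>
      let l := labels.getD i 0
      if PySem.Int.mod (nodes.getD i 0) 2 = PySem.Int.mod (degrees.getD i 0) 2 then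
        (c.1.set l (c.1.getD l 0 + 1), c.2)
      else
        (c.1, c.2.set l (c.2.getD l 0 + 1)))
    (List.replicate n 0, List.replicate n 0)

def pvFinish (labels : List Nat) (cnt1 cnt2 : List Int) (n : Nat) : Int × Int :=
  (List.range n).foldl (fun nr i =>
      if labels.getD i 0 = i then
        ((if cnt1.getD i 0 = 1 then nr.1 + 1 else nr.1),
         (if cnt2.getD i 0 = 1 then nr.2 + 1 else nr.2))
      else nr)
    (0, 0)

def solution_alt (nodes : List Int) (edges : List (Int × Int)) : Int × Int :=
  let n := nodes.length
  let idx := pvIdx nodes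
  let st := pvMerge idx n edges
  let cnt := pvCount nodes st.1 st.2 n
  pvFinish st.2 cnt.1 cnt.2 n

-- ===== PRECONDITION & SPEC =====
-- Pre_ excludes exactly the inputs where A raises KeyError: an edge endpoint absent from nodes.
def Pre_solution (nodes : List Int) (edges : List (Int × Int)) : Prop :=
  ∀ e ∈ edges, e.1 ∈ nodes ∧ e.2 ∈ nodes
instance (nodes : List Int) (edges : List (Int × Int)) : Decidable (Pre_solution nodes edges) := by
  unfold Pre_solution; infer_instance

def pvWitness_solution : List Int × (List (Int × Int)) := ([2, 3, 4], [(2, 3)])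

def Spec_solution (nodes : List Int) (edges : List (Int × Int)) (out : Int × Int) : Prop := out = solution_alt nodes edges
instance (nodes : List Int) (edges : List (Int × Int)) (out : Int × Int) : Decidable (Spec_solution nodes edges out) := by unfold Spec_solution; infer_instance

-- ===== CLAIM (what is proved, stated in full; the proofs are below) =====
def Claim_equal_solution : Prop := ∀ (nodes : List Int) (edges : List (Int × Int)), Dom_solution nodes edges → Pre_solution nodes edges → Spec_solution nodes edges (solution nodes edges)

-- ===== LEMMAS AND PROOFS =====

-- the parent step of a union-find state
def stepP (p : List Nat) (i : Nat) : Nat := p.getD i 0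

-- Rt p i r k: from i, k parent steps (all leaving non-fixpoints) reach the fixpoint r
inductive Rt (p : List Nat) : Nat → Nat → Nat → Prop
  | root (i : Nat) : stepP p i = i → Rt p i i 0
  | step (i r k : Nat) : stepP p i ≠ i → Rt p (stepP p i) r k → Rt p i r (k+1)

def RtE (p : List Nat) (i r : Nat) : Prop := ∃ k, Rt p i r k

-- valid union-find state over n slots
def Good (p : List Nat) (n : Nat) : Prop :=
  p.length = n ∧ (∀ i, i < n → stepP p i < n) ∧ (∀ i, i < n → ∃ r, RtE p i r)

theorem Rt_fix {p : List Nat} {i r k : Nat} (h : Rt p i r k) : stepP p r = r := by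
  induction h with
  | root _ h => exact h
  | step _ _ _ _ _ ih => exact ih

theorem Rt_fun {p : List Nat} {i r k r' k' : Nat} (h : Rt p i r k) (h' : Rt p i r' k') :
    r = r' ∧ k = k' := by
  induction h generalizing r' k' with
  | root i hfix => cases h' with
    | root => exact ⟨rfl, rfl⟩
    | step _ _ _ hne => exact absurd hfix hne
  | step i r k hne _ ih => cases h' with
    | root _ hfix => exact absurd hfix hne
    | step _ _ _ _ htail =>
        obtain ⟨h1, h2⟩ := ih htail
        exact ⟨h1, by omega⟩

theorem RtE_fun {p : List Nat} {i r r' : Nat} (h : RtE p i r) (h' : RtE p i r') : r = r' := by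
  obtain ⟨k, h⟩ := h; obtain ⟨k', h'⟩ := h'; exact (Rt_fun h h').1

theorem Rt_lt {p : List Nat} {n i r k : Nat} (hb : ∀ j, j < n → stepP p j < n)
    (hi : i < n) (h : Rt p i r k) : r < n := by
  induction h with
  | root _ _ => exact hi
  | step i r k hne htail ih => exact ih (hb i hi)


-- k-fold parent step
def itS (p : List Nat) : Nat → Nat → Nat
  | 0, i => i
  | (k+1), i => stepP p (itS p k i)

theorem itS_succ_front (p : List Nat) (k i : Nat) :
    itS p (k+1) i = itS p k (stepP p i) := by
  induction k with
  | zero => rfl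
  | succ k ih => show stepP p (itS p (k+1) i) = _; rw [ih]; rfl

theorem itS_add (p : List Nat) (a m i : Nat) : itS p (a + m) i = itS p m (itS p a i) := by
  induction m with
  | zero => rfl
  | succ m ih => show stepP p (itS p (a + m) i) = stepP p (itS p m (itS p a i)); rw [ih]

theorem Rt_iter {p : List Nat} {i r k : Nat} (h : Rt p i r k) :
    itS p k i = r ∧ ∀ j, j < k → stepP p (itS p j i) ≠ itS p j i := by
  induction h with
  | root i hfix => exact ⟨rfl, by omega⟩
  | step i r k hne htail ih =>
      refine ⟨by rw [itS_succ_front]; exact ih.1, ?_⟩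
      intro j hj
      cases j with
      | zero => exact hne
      | succ j => rw [itS_succ_front]; exact ih.2 j (by omega)

theorem itS_lt {p : List Nat} {n : Nat} (hb : ∀ j, j < n → stepP p j < n)
    {i : Nat} (hi : i < n) (k : Nat) : itS p k i < n := by
  induction k with
  | zero => exact hi
  | succ k ih => exact hb _ ih

-- a chain with all intermediate nodes non-fixpoints has pairwise-distinct nodes, hence k < n
theorem Rt_k_lt {p : List Nat} {n i r k : Nat} (hb : ∀ j, j < n → stepP p j < n)
    (hi : i < n) (h : Rt p i r k) : k < n := by
  obtain ⟨hreach, hnf⟩ := Rt_iter h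
  by_contra hnk
  rw [Nat.not_lt] at hnk
  have hinj : Function.Injective (fun j : Fin (k+1) => (⟨itS p j.1 i, itS_lt hb hi j.1⟩ : Fin n)) := by
    intro a b hab
    simp only [Fin.mk.injEq] at hab
    by_contra hne
    -- wlog a < b; derive a fixpoint strictly before k
    have key : ∀ (a b : Fin (k+1)), a.1 < b.1 → itS p a.1 i = itS p b.1 i → False := by
      intro a b hlt heq
      have h1 : itS p (a.1 + (k - b.1)) i = itS p (b.1 + (k - b.1)) i := by
        rw [itS_add, itS_add, heq]
      have h2 : b.1 + (k - b.1) = k := by omega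
      rw [h2, hreach] at h1
      have h3 : a.1 + (k - b.1) < k := by omega
      have := hnf _ h3
      rw [h1] at this
      exact this (Rt_fix h)
    rcases Nat.lt_or_ge a.1 b.1 with hlt | hge
    · exact key a b hlt hab
    · have : b.1 < a.1 := by
        rcases Nat.lt_or_ge b.1 a.1 with h | h
        · exact h
        · exact absurd (Fin.ext (by omega)) hne
      exact key b a this hab.symm
  have := Fintype.card_le_of_injective _ hinj
  simp at this
  omega

-- getD after set
theorem getD_set {α : Type} (l : List α) (i : Nat) (a d : α) (j : Nat) :
    (l.set i a).getD j d = if j = i ∧ i < l.length then a else l.getD j d := by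
  simp [List.getD_eq_getElem?_getD, List.getElem?_set]
  split_ifs with h1 h2 h3 h4 <;> simp_all

theorem stepP_set (l : List Nat) (i a j : Nat) :
    stepP (l.set i a) j = if j = i ∧ i < l.length then a else stepP l j := by
  simpa [stepP] using getD_set l i a 0 j

-- compression step: setting p[i] := r where r is i's root preserves the Rt relation
theorem Rt_set_root {q : List Nat} {i r : Nat} (hir : RtE q i r) (hfix : stepP q r = r) :
    ∀ j s k, Rt q j s k → ∃ k', Rt (q.set i r) j s k' := by
  intro j s k h
  induction h with
  | root j hj =>
      by_cases hji : j = i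
      · subst hji
        have hrj : r = j := RtE_fun hir ⟨0, Rt.root j hj⟩
        subst hrj
        exact ⟨0, Rt.root _ (by rw [stepP_set]; split_ifs <;> simp [hj])⟩
      · exact ⟨0, Rt.root _ (by rw [stepP_set]; simp [hji, hj])⟩
  | step j s k hne htail ih =>
      obtain ⟨k1, htail'⟩ := ih
      by_cases hji : j = i
      · subst hji
        have hsr : s = r := RtE_fun ⟨k+1, Rt.step _ _ _ hne htail⟩ hir
        subst hsr
        by_cases hil : j < q.length
        · have hstep : stepP (q.set j s) j = s := by rw [stepP_set]; simp [hil]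
          by_cases hsi : s = j
          · rw [hsi]; rw [hsi] at hstep; exact ⟨0, Rt.root _ hstep⟩
          · have hs2 : stepP (q.set j s) s = s := by
              rw [stepP_set]; simp [hsi]; exact Rt_fix htail
            exact ⟨1, Rt.step _ _ _ (by rw [hstep]; exact hsi) (by rw [hstep]; exact Rt.root _ hs2)⟩
        · rw [List.set_eq_of_length_le (by omega)]
          exact ⟨k+1, Rt.step _ _ _ hne htail⟩
      · have hstep : stepP (q.set i r) j = stepP q j := by rw [stepP_set]; simp [hji]
        exact ⟨k1+1, Rt.step _ _ _ (by rw [hstep]; exact hne) (by rw [hstep]; exact htail')⟩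

-- merge step: setting root rb to point to root ra redirects exactly the rb-class
theorem Rt_set_merge {q : List Nat} {ra rb : Nat} (ha : stepP q ra = ra) (hb : stepP q rb = rb)
    (hne : ra ≠ rb) (hblt : rb < q.length) :
    ∀ j s k, Rt q j s k → ∃ k', Rt (q.set rb ra) j (if s = rb then ra else s) k' := by
  have hra' : stepP (q.set rb ra) ra = ra := by
    rw [stepP_set]; simp [hne, ha]
  intro j s k h
  induction h with
  | root j hj =>
      by_cases hjb : j = rb
      · rw [if_pos hjb]
        have hstep : stepP (q.set rb ra) j = ra := by rw [stepP_set]; simp [hjb, hblt]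
        have hnra : stepP (q.set rb ra) j ≠ j := by rw [hstep, hjb]; exact hne
        exact ⟨1, Rt.step _ _ _ hnra (by rw [hstep]; exact Rt.root _ hra')⟩
      · simp only [if_neg hjb]
        exact ⟨0, Rt.root _ (by rw [stepP_set]; simp [hjb, hj])⟩
  | step j s k hj htail ih =>
      obtain ⟨k1, htail'⟩ := ih
      have hjb : j ≠ rb := fun h => hj (by rw [h]; exact hb)
      have hstep : stepP (q.set rb ra) j = stepP q j := by rw [stepP_set]; simp [hjb]
      exact ⟨k1+1, Rt.step _ _ _ (by rw [hstep]; exact hj) (by rw [hstep]; exact htail')⟩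

-- find: returns the root, preserves length, bounds and the whole Rt relation (forward)
theorem find_ok {n : Nat} : ∀ (fuel : Nat) (p : List Nat) (i r k : Nat),
    p.length = n → (∀ j, j < n → stepP p j < n) → i < n → Rt p i r k → k < fuel →
    (pvFind p i fuel).1 = r ∧ (pvFind p i fuel).2.length = n ∧
    (∀ j, j < n → stepP (pvFind p i fuel).2 j < n) ∧
    (∀ j s k', Rt p j s k' → ∃ k'', Rt (pvFind p i fuel).2 j s k'') := by
  intro fuel
  induction fuel with
  | zero => intro p i r k _ _ _ _ hk; omega
  | succ fuel ih =>
      intro p i r k hlen hb hi h hk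
      by_cases hstep : p.getD i 0 = i
      · have hri : r = i := (Rt_fun h (Rt.root _ hstep)).1
        have e : pvFind p i (fuel+1) = (p.getD i 0, p) := by
          rw [pvFind, if_neg (not_not_intro hstep)]
        rw [hstep] at e
        rw [e]
        exact ⟨hri.symm, hlen, hb, fun j s k' hj => ⟨k', hj⟩⟩
      · cases h with
        | root _ hfix => exact absurd hfix hstep
        | step _ _ k1 hne htail =>
            obtain ⟨hq1, hqlen, hqb, hqpres⟩ :=
              ih p (p.getD i 0) r k1 hlen hb (hb i hi) htail (by omega)
            obtain ⟨k'', hq⟩ := hqpres i r _ (Rt.step _ _ _ hne htail)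
            have hfixq : stepP (pvFind p (p.getD i 0) fuel).2 r = r := Rt_fix hq
            have hrlt : r < n := Rt_lt hb hi (Rt.step _ _ _ hne htail)
            have e : pvFind p i (fuel+1)
                = (((pvFind p (p.getD i 0) fuel).2.set i (pvFind p (p.getD i 0) fuel).1).getD i 0,
                   (pvFind p (p.getD i 0) fuel).2.set i (pvFind p (p.getD i 0) fuel).1) := by
              rw [pvFind, if_pos hstep]
            rw [e]
            constructor
            · rw [getD_set, hqlen, if_pos ⟨rfl, hi⟩]; exact hq1
            refine ⟨by rw [List.length_set]; exact hqlen, ?_, ?_⟩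
            · intro j hj
              rw [stepP_set]
              split_ifs with hcond
              · rw [hq1]; exact hrlt
              · exact hqb j hj
            · intro j s k' hj
              obtain ⟨k2, hj2⟩ := hqpres j s k' hj
              rw [hq1]
              exact Rt_set_root ⟨k'', hq⟩ hfixq j s k2 hj2

-- union: Good is preserved and the root function is merged
theorem union_ok {n : Nat} {p : List Nat} {a b : Nat} (hg : Good p n)
    (ha : a < n) (hb : b < n) (ρ : Nat → Nat) (hρ : ∀ i, i < n → RtE p i (ρ i)) :
    Good (pvUnion p a b) n ∧
    (∀ i, i < n → RtE (pvUnion p a b) i (if ρ i = ρ b then ρ a else ρ i)) := by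
  obtain ⟨hlen, hbnd, htot⟩ := hg
  obtain ⟨ka, hra⟩ := hρ a ha
  obtain ⟨e1, hlen1, hb1, hpres1⟩ :=
    find_ok (n := n) p.length p a (ρ a) ka hlen hbnd ha hra
      (by rw [hlen]; exact Rt_k_lt hbnd ha hra)
  have hρ1 : ∀ i, i < n → RtE (pvFind p a p.length).2 i (ρ i) := by
    intro i hi
    obtain ⟨k, hk⟩ := hρ i hi
    exact hpres1 i _ k hk
  obtain ⟨kb, hrb⟩ := hρ1 b hb
  obtain ⟨e2, hlen2, hb2, hpres2⟩ :=
    find_ok (n := n) (pvFind p a p.length).2.length (pvFind p a p.length).2 b (ρ b) kb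
      hlen1 hb1 hb hrb (by rw [hlen1]; exact Rt_k_lt hb1 hb hrb)
  have hρ2 : ∀ i, i < n →
      RtE (pvFind (pvFind p a p.length).2 b (pvFind p a p.length).2.length).2 i (ρ i) := by
    intro i hi
    obtain ⟨k, hk⟩ := hρ1 i hi
    exact hpres2 i _ k hk
  have hu : pvUnion p a b =
      if (pvFind p a p.length).1 ≠ (pvFind (pvFind p a p.length).2 b (pvFind p a p.length).2.length).1
      then (pvFind (pvFind p a p.length).2 b (pvFind p a p.length).2.length).2.set
             (pvFind (pvFind p a p.length).2 b (pvFind p a p.length).2.length).1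
             (pvFind p a p.length).1
      else (pvFind (pvFind p a p.length).2 b (pvFind p a p.length).2.length).2 := rfl
  rw [hu, e1, e2]
  by_cases hab : ρ a = ρ b
  · rw [if_neg (not_not_intro hab)]
    refine ⟨⟨hlen2, hb2, fun i hi => ⟨ρ i, hρ2 i hi⟩⟩, ?_⟩
    intro i hi
    by_cases hib : ρ i = ρ b
    · rw [if_pos hib, hab, ← hib]; exact hρ2 i hi
    · rw [if_neg hib]; exact hρ2 i hi
  · rw [if_pos hab]
    have hfa : stepP (pvFind (pvFind p a p.length).2 b (pvFind p a p.length).2.length).2 (ρ a) = ρ a := by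
      obtain ⟨k, hk⟩ := hρ2 a ha; exact Rt_fix hk
    have hfb : stepP (pvFind (pvFind p a p.length).2 b (pvFind p a p.length).2.length).2 (ρ b) = ρ b := by
      obtain ⟨k, hk⟩ := hρ2 b hb; exact Rt_fix hk
    have hblt : ρ b < n := by
      obtain ⟨k, hk⟩ := hρ2 b hb; exact Rt_lt hb2 hb hk
    have halt : ρ a < n := by
      obtain ⟨k, hk⟩ := hρ2 a ha; exact Rt_lt hb2 ha hk
    have hroots : ∀ i, i < n →
        RtE ((pvFind (pvFind p a p.length).2 b (pvFind p a p.length).2.length).2.set (ρ b) (ρ a)) i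
          (if ρ i = ρ b then ρ a else ρ i) := by
      intro i hi
      obtain ⟨k, hk⟩ := hρ2 i hi
      exact Rt_set_merge hfa hfb hab (by rw [hlen2]; exact hblt) i (ρ i) k hk
    refine ⟨⟨by rw [List.length_set]; exact hlen2, ?_, ?_⟩, hroots⟩
    · intro j hj
      rw [stepP_set]
      split_ifs with hc
      · exact halt
      · exact hb2 j hj
    · intro i hi
      exact ⟨_, hroots i hi⟩


-- B's per-edge label update (as a function, for the bisimulation statements)
def labStep (idx : PySem.Dict Int Nat) (l : List Nat) (e : Int × Int) : List Nat :=
  let la := l.getD (pvLook idx e.1) 0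
  let lb := l.getD (pvLook idx e.2) 0
  if la ≠ lb then l.map (fun x => if x = lb then la else x) else l

theorem getD_map_lt (l : List Nat) (f : Nat → Nat) {i : Nat} (h : i < l.length) :
    (l.map f).getD i 0 = f (l.getD i 0) := by
  simp [List.getD_eq_getElem?_getD, List.getElem?_map, List.getElem?_eq_getElem h]

-- pure merge of a representative function
theorem merge_iff {n : Nat} (ρ L : Nat → Nat) (u v : Nat) (hu : u < n) (hv : v < n)
    (h : ∀ i j, i < n → j < n → (ρ i = ρ j ↔ L i = L j)) :
    ∀ i j, i < n → j < n →
      ((if ρ i = ρ v then ρ u else ρ i) = (if ρ j = ρ v then ρ u else ρ j) ↔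
       (if L i = L v then L u else L i) = (if L j = L v then L u else L j)) := by
  intro i j hi hj
  by_cases hiv : ρ i = ρ v <;> by_cases hjv : ρ j = ρ v
  · rw [if_pos hiv, if_pos hjv, if_pos ((h i v hi hv).mp hiv), if_pos ((h j v hj hv).mp hjv)]
    simp
  · rw [if_pos hiv, if_neg hjv, if_pos ((h i v hi hv).mp hiv),
      if_neg (fun hh => hjv ((h j v hj hv).mpr hh))]
    exact h u j hu hj
  · rw [if_neg hiv, if_pos hjv, if_neg (fun hh => hiv ((h i v hi hv).mpr hh)),
      if_pos ((h j v hj hv).mp hjv)]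
    exact h i u hi hu
  · rw [if_neg hiv, if_neg hjv, if_neg (fun hh => hiv ((h i v hi hv).mpr hh)),
      if_neg (fun hh => hjv ((h j v hj hv).mpr hh))]
    exact h i j hi hj

-- the whole edge phase: A's union fold and B's relabel fold stay linked by a common ρ
theorem phase2 {n : Nat} (idx : PySem.Dict Int Nat) :
    ∀ (es : List (Int × Int)) (p lab : List Nat) (ρ : Nat → Nat),
    Good p n → lab.length = n →
    (∀ i, i < n → lab.getD i 0 < n ∧ lab.getD (lab.getD i 0) 0 = lab.getD i 0) →
    (∀ i, i < n → RtE p i (ρ i)) →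
    (∀ i j, i < n → j < n → (ρ i = ρ j ↔ lab.getD i 0 = lab.getD j 0)) →
    (∀ e ∈ es, pvLook idx e.1 < n ∧ pvLook idx e.2 < n) →
    ∃ ρ' : Nat → Nat,
      Good (es.foldl (fun q e => pvUnion q (pvLook idx e.1) (pvLook idx e.2)) p) n ∧
      (es.foldl (labStep idx) lab).length = n ∧
      (∀ i, i < n → (es.foldl (labStep idx) lab).getD i 0 < n ∧
        (es.foldl (labStep idx) lab).getD ((es.foldl (labStep idx) lab).getD i 0) 0
          = (es.foldl (labStep idx) lab).getD i 0) ∧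
      (∀ i, i < n → RtE (es.foldl (fun q e => pvUnion q (pvLook idx e.1) (pvLook idx e.2)) p) i (ρ' i)) ∧
      (∀ i j, i < n → j < n →
        (ρ' i = ρ' j ↔ (es.foldl (labStep idx) lab).getD i 0 = (es.foldl (labStep idx) lab).getD j 0)) := by
  intro es
  induction es with
  | nil =>
      intro p lab ρ hg hlablen hlabfix hroots hiff _
      exact ⟨ρ, hg, hlablen, hlabfix, hroots, hiff⟩
  | cons e es ih =>
      intro p lab ρ hg hlablen hlabfix hroots hiff hval
      obtain ⟨hu, hv⟩ := hval e (List.mem_cons_self ..)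
      have hstep := union_ok hg hu hv ρ hroots
      have hlabu : labStep idx lab e =
          (if lab.getD (pvLook idx e.1) 0 ≠ lab.getD (pvLook idx e.2) 0
           then lab.map (fun x => if x = lab.getD (pvLook idx e.2) 0
                                  then lab.getD (pvLook idx e.1) 0 else x)
           else lab) := rfl
      have hchar : ∀ i, i < n → (labStep idx lab e).getD i 0 =
          (if lab.getD i 0 = lab.getD (pvLook idx e.2) 0
           then lab.getD (pvLook idx e.1) 0 else lab.getD i 0) := by
        intro i hi
        rw [hlabu]
        by_cases hcase : lab.getD (pvLook idx e.1) 0 ≠ lab.getD (pvLook idx e.2) 0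
        · rw [if_pos hcase, getD_map_lt _ _ (by rw [hlablen]; exact hi)]
        · rw [if_neg hcase]
          rw [not_not] at hcase
          split_ifs with h1
          · rw [h1, hcase]
          · rfl
      have hlen1 : (labStep idx lab e).length = n := by
        rw [hlabu]
        split_ifs <;> simp [hlablen]
      have hfix1 : ∀ i, i < n → (labStep idx lab e).getD i 0 < n ∧
          (labStep idx lab e).getD ((labStep idx lab e).getD i 0) 0
            = (labStep idx lab e).getD i 0 := by
        intro i hi
        have hlt : (labStep idx lab e).getD i 0 < n := by
          rw [hchar i hi]
          split_ifs
          · exact (hlabfix _ hu).1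
          · exact (hlabfix _ hi).1
        refine ⟨hlt, ?_⟩
        rw [hchar i hi, hchar _ (by rw [← hchar i hi]; exact hlt)]
        by_cases h1 : lab.getD i 0 = lab.getD (pvLook idx e.2) 0
        · simp only [if_pos h1]
          rw [(hlabfix _ hu).2]
          split_ifs <;> rfl
        · simp only [if_neg h1]
          rw [(hlabfix _ hi).2, if_neg h1]
      have hiff1 : ∀ i j, i < n → j < n →
          ((if ρ i = ρ (pvLook idx e.2) then ρ (pvLook idx e.1) else ρ i)
            = (if ρ j = ρ (pvLook idx e.2) then ρ (pvLook idx e.1) else ρ j) ↔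
           (labStep idx lab e).getD i 0 = (labStep idx lab e).getD j 0) := by
        intro i j hi hj
        rw [hchar i hi, hchar j hj]
        exact merge_iff ρ (fun i => lab.getD i 0) _ _ hu hv hiff i j hi hj
      have := ih (pvUnion p (pvLook idx e.1) (pvLook idx e.2)) (labStep idx lab e)
        (fun i => if ρ i = ρ (pvLook idx e.2) then ρ (pvLook idx e.1) else ρ i)
        hstep.1 hlen1 hfix1 hstep.2 hiff1
        (fun e' he' => hval e' (List.mem_cons_of_mem _ he'))
      simpa using this


-- A's parity-tally pass: the threaded finds return ρ and the tallies are pure folds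
theorem phase4 {n : Nat} (c : Nat → Prop) [DecidablePred c] (ρ : Nat → Nat) :
    ∀ (L : List Nat) (p : List Nat) (rg ng : List Int),
    Good p n → (∀ i, i < n → RtE p i (ρ i)) → (∀ i ∈ L, i < n) →
    Good (L.foldl (fun (st : List Nat × List Int × List Int) i =>
        let f := pvFind st.1 i n
        if c i then (f.2, st.2.1.set f.1 (st.2.1.getD f.1 0 + 1), st.2.2)
        else (f.2, st.2.1, st.2.2.set f.1 (st.2.2.getD f.1 0 + 1))) (p, rg, ng)).1 n ∧
    (∀ i, i < n → RtE (L.foldl (fun (st : List Nat × List Int × List Int) i =>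
        let f := pvFind st.1 i n
        if c i then (f.2, st.2.1.set f.1 (st.2.1.getD f.1 0 + 1), st.2.2)
        else (f.2, st.2.1, st.2.2.set f.1 (st.2.2.getD f.1 0 + 1))) (p, rg, ng)).1 i (ρ i)) ∧
    (L.foldl (fun (st : List Nat × List Int × List Int) i =>
        let f := pvFind st.1 i n
        if c i then (f.2, st.2.1.set f.1 (st.2.1.getD f.1 0 + 1), st.2.2)
        else (f.2, st.2.1, st.2.2.set f.1 (st.2.2.getD f.1 0 + 1))) (p, rg, ng)).2
      = (L.foldl (fun rg i => if c i then rg.set (ρ i) (rg.getD (ρ i) 0 + 1) else rg) rg,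
         L.foldl (fun ng i => if c i then ng else ng.set (ρ i) (ng.getD (ρ i) 0 + 1)) ng) := by
  intro L
  induction L with
  | nil => intro p rg ng hg hroots _; exact ⟨hg, hroots, rfl⟩
  | cons i L ih =>
      intro p rg ng hg hroots hmem
      have hi : i < n := hmem i (List.mem_cons_self ..)
      obtain ⟨hlen, hbnd, htot⟩ := hg
      obtain ⟨k, hk⟩ := hroots i hi
      obtain ⟨e1, hlen2, hb2, hpres⟩ :=
        find_ok (n := n) n p i (ρ i) k hlen hbnd hi hk (Rt_k_lt hbnd hi hk)
      have hg2 : Good (pvFind p i n).2 n := by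
        refine ⟨hlen2, hb2, fun j hj => ?_⟩
        obtain ⟨r0, k0, hk0⟩ := htot j hj
        exact ⟨r0, hpres j r0 k0 hk0⟩
      have hroots2 : ∀ j, j < n → RtE (pvFind p i n).2 j (ρ j) := by
        intro j hj
        obtain ⟨k0, hk0⟩ := hroots j hj
        exact hpres j _ k0 hk0
      simp only [List.foldl_cons]
      by_cases hc : c i
      · rw [if_pos hc, if_pos hc, if_pos hc, e1]
        exact ih (pvFind p i n).2 _ _ hg2 hroots2 (fun j hj => hmem j (List.mem_cons_of_mem _ hj))
      · rw [if_neg hc, if_neg hc, if_neg hc, e1]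
        exact ih (pvFind p i n).2 _ _ hg2 hroots2 (fun j hj => hmem j (List.mem_cons_of_mem _ hj))

-- A's final pass: the threaded finds reduce it to a pure fold over ρ
theorem phase5 {n : Nat} (rgF ngF : List Int) (ρ : Nat → Nat) :
    ∀ (L : List Nat) (p : List Nat) (nor rev : Int),
    Good p n → (∀ i, i < n → RtE p i (ρ i)) → (∀ i ∈ L, i < n) →
    (L.foldl (fun (st : List Nat × Int × Int) i =>
        let f := pvFind st.1 i n
        if f.1 ≠ i then (f.2, st.2.1, st.2.2)
        else (f.2, (if rgF.getD i 0 = 1 then st.2.1 + 1 else st.2.1),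
                   (if ngF.getD i 0 = 1 then st.2.2 + 1 else st.2.2))) (p, nor, rev)).2
      = (L.foldl (fun a i => if ρ i ≠ i then a else if rgF.getD i 0 = 1 then a + 1 else a) nor,
         L.foldl (fun a i => if ρ i ≠ i then a else if ngF.getD i 0 = 1 then a + 1 else a) rev) := by
  intro L
  induction L with
  | nil => intro p nor rev hg hroots _; rfl
  | cons i L ih =>
      intro p nor rev hg hroots hmem
      have hi : i < n := hmem i (List.mem_cons_self ..)
      obtain ⟨hlen, hbnd, htot⟩ := hg
      obtain ⟨k, hk⟩ := hroots i hi
      obtain ⟨e1, hlen2, hb2, hpres⟩ :=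
        find_ok (n := n) n p i (ρ i) k hlen hbnd hi hk (Rt_k_lt hbnd hi hk)
      have hg2 : Good (pvFind p i n).2 n := by
        refine ⟨hlen2, hb2, fun j hj => ?_⟩
        obtain ⟨r0, k0, hk0⟩ := htot j hj
        exact ⟨r0, hpres j r0 k0 hk0⟩
      have hroots2 : ∀ j, j < n → RtE (pvFind p i n).2 j (ρ j) := by
        intro j hj
        obtain ⟨k0, hk0⟩ := hroots j hj
        exact hpres j _ k0 hk0
      simp only [List.foldl_cons]
      rw [e1]
      by_cases hc : ρ i ≠ i
      · rw [if_pos hc, if_pos hc, if_pos hc]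
        exact ih (pvFind p i n).2 _ _ hg2 hroots2 (fun j hj => hmem j (List.mem_cons_of_mem _ hj))
      · rw [if_neg hc, if_neg hc, if_neg hc]
        exact ih (pvFind p i n).2 _ _ hg2 hroots2 (fun j hj => hmem j (List.mem_cons_of_mem _ hj))

-- a fold over a pair whose step acts componentwise is a pair of folds
theorem foldl_pair_split {α β γ : Type} (F : (α × β) → γ → (α × β)) (f : α → γ → α)
    (g : β → γ → β) (h : ∀ a b x, F (a, b) x = (f a x, g b x)) :
    ∀ (L : List γ) (a : α) (b : β), L.foldl F (a, b) = (L.foldl f a, L.foldl g b) := by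
  intro L
  induction L with
  | nil => intro a b; rfl
  | cons x xs ih =>
      intro a b
      rw [List.foldl_cons, List.foldl_cons, List.foldl_cons, h]
      exact ih _ _

-- counter-array fold: the cell at t counts matching indices
theorem count_fold_getD (key : Nat → Nat) (c : Nat → Prop) [DecidablePred c] :
    ∀ (L : List Nat) (acc : List Int) (t : Nat), t < acc.length → (∀ i ∈ L, key i < acc.length) →
    (L.foldl (fun rg i => if c i then rg.set (key i) (rg.getD (key i) 0 + 1) else rg) acc).getD t 0
      = acc.getD t 0 + ((L.filter (fun i => decide (c i) && (key i == t))).length : Int) := by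
  intro L
  induction L with
  | nil => intro acc t _ _; simp
  | cons i L ih =>
      intro acc t ht hkey
      simp only [List.foldl_cons, List.filter_cons]
      by_cases hc : c i
      · rw [if_pos hc]
        have hlen : (acc.set (key i) (acc.getD (key i) 0 + 1)).length = acc.length :=
          List.length_set ..
        rw [ih (acc.set (key i) (acc.getD (key i) 0 + 1)) t (by rw [hlen]; exact ht)
            (fun j hj => by rw [hlen]; exact hkey j (List.mem_cons_of_mem _ hj)),
          getD_set]
        by_cases hkt : key i = t
        · rw [if_pos ⟨hkt.symm, hkey i (List.mem_cons_self ..)⟩, hkt]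
          simp [hc]
          push_cast
          ring
        · rw [if_neg (by rintro ⟨h1, _⟩; exact hkt h1.symm)]
          simp [hc, hkt]
  -- the guard fails: the head contributes nothing
      · rw [if_neg hc]
        rw [ih acc t ht (fun j hj => hkey j (List.mem_cons_of_mem _ hj))]
        simp [hc]

-- accumulate-1 fold: counts indices passing the guard
theorem skip_fold_count (C Q : Nat → Prop) [DecidablePred C] [DecidablePred Q] :
    ∀ (L : List Nat) (a : Int),
    L.foldl (fun acc i => if C i then acc else if Q i then acc + 1 else acc) a
      = a + ((L.filter (fun i => !decide (C i) && decide (Q i))).length : Int) := by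
  intro L
  induction L with
  | nil => intro a; simp
  | cons i L ih =>
      intro a
      simp only [List.foldl_cons, List.filter_cons]
      by_cases hc : C i
      · rw [if_pos hc, ih a]
        simp [hc]
      · rw [if_neg hc]
        by_cases hq : Q i
        · rw [if_pos hq, ih (a + 1)]
          simp [hc, hq]
          push_cast
          ring
        · rw [if_neg hq, ih a]
          simp [hc, hq]

-- a List.range filter length is a Finset.range filter card
theorem filter_range_card (n : Nat) (p : Nat → Bool) :
    ((List.range n).filter p).length = (Finset.filter (fun i => p i = true) (Finset.range n)).card := by
  rw [← List.countP_eq_length_filter, Finset.card_filter]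
  induction n with
  | zero => simp
  | succ n ih =>
      rw [List.range_succ, Finset.sum_range_succ, List.countP_append, ih]
      simp [List.countP_cons]

-- the heart of the counting argument: two representative maps inducing the same partition
-- select the same number of classes with a unit tally
theorem rep_card_eq {n : Nat} (kA kB : Nat → Nat) (c : Nat → Prop) [DecidablePred c]
    (hA1 : ∀ i, i < n → kA i < n) (hB1 : ∀ i, i < n → kB i < n)
    (hA2 : ∀ i, i < n → kA (kA i) = kA i) (hB2 : ∀ i, i < n → kB (kB i) = kB i)
    (h3 : ∀ i j, i < n → j < n → (kA i = kA j ↔ kB i = kB j)) :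
    (Finset.filter (fun i => kA i = i ∧
        (Finset.filter (fun j => c j ∧ kA j = i) (Finset.range n)).card = 1) (Finset.range n)).card
    = (Finset.filter (fun i => kB i = i ∧
        (Finset.filter (fun j => c j ∧ kB j = i) (Finset.range n)).card = 1) (Finset.range n)).card := by
  have hcnt : ∀ i, i < n → kA i = i →
      (Finset.filter (fun j => c j ∧ kA j = i) (Finset.range n)).card
        = (Finset.filter (fun j => c j ∧ kB j = kB i) (Finset.range n)).card := by
    intro i hi hki
    congr 1
    apply Finset.filter_congr
    intro j hj
    have hjn : j < n := Finset.mem_range.mp hj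
    have : (kA j = i) ↔ (kB j = kB i) := by
      rw [show (kA j = i) ↔ (kA j = kA i) by rw [hki]]
      exact h3 j i hjn hi
    simp [this]
  have hcnt' : ∀ i, i < n → kB i = i →
      (Finset.filter (fun j => c j ∧ kB j = i) (Finset.range n)).card
        = (Finset.filter (fun j => c j ∧ kA j = kA i) (Finset.range n)).card := by
    intro i hi hki
    congr 1
    apply Finset.filter_congr
    intro j hj
    have hjn : j < n := Finset.mem_range.mp hj
    have : (kB j = i) ↔ (kA j = kA i) := by
      rw [show (kB j = i) ↔ (kB j = kB i) by rw [hki]]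
      exact (h3 j i hjn hi).symm
    simp [this]
  apply Finset.card_bij' (fun i _ => kB i) (fun j _ => kA j)
  · intro i hmem
    rw [Finset.mem_filter] at hmem ⊢
    obtain ⟨hrange, hki, hcard⟩ := hmem
    have hi : i < n := Finset.mem_range.mp hrange
    refine ⟨Finset.mem_range.mpr (hB1 i hi), hB2 i hi, ?_⟩
    rw [← hcnt i hi hki]
    exact hcard
  · intro j hmem
    rw [Finset.mem_filter] at hmem ⊢
    obtain ⟨hrange, hkj, hcard⟩ := hmem
    have hj : j < n := Finset.mem_range.mp hrange
    refine ⟨Finset.mem_range.mpr (hA1 j hj), hA2 j hj, ?_⟩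
    rw [← hcnt' j hj hkj]
    exact hcard
  · intro i hmem
    rw [Finset.mem_filter] at hmem
    obtain ⟨hrange, hki, _⟩ := hmem
    have hi : i < n := Finset.mem_range.mp hrange
    have := (h3 (kB i) i (hB1 i hi) hi).mpr (hB2 i hi)
    rw [this, hki]
  · intro j hmem
    rw [Finset.mem_filter] at hmem
    obtain ⟨hrange, hkj, _⟩ := hmem
    have hj : j < n := Finset.mem_range.mp hrange
    have := (h3 (kA j) j (hA1 j hj) hj).mp (hA2 j hj)
    rw [this, hkj]

-- pvIdx: every value is an index below n, every node is a key
theorem pvIdx_fold_lt : ∀ (l : List Int) (d : PySem.Dict Int Nat) (c : Nat),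
    (∀ k m, d.get? k = some m → m < c) →
    ∀ k m, (l.foldl (fun st x => (st.1.insert x st.2, st.2 + 1)) (d, c)).1.get? k = some m →
      m < c + l.length := by
  intro l
  induction l with
  | nil => intro d c h k m hk; simpa using h k m hk
  | cons x l ih =>
      intro d c h k m hk
      simp only [List.foldl_cons] at hk
      have hstep : ∀ k' m', (d.insert x c).get? k' = some m' → m' < c + 1 := by
        intro k' m' hk'
        rw [PySem.Dict.get?_insert] at hk'
        split_ifs at hk' with hc
        · simp only [Option.some.injEq] at hk'
          omega
        · exact Nat.lt_succ_of_lt (h k' m' hk')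
      have := ih (d.insert x c) (c + 1) hstep k m hk
      simp only [List.length_cons]
      omega

theorem pvIdx_fold_mem : ∀ (l : List Int) (d : PySem.Dict Int Nat) (c : Nat) (x : Int),
    (x ∈ l ∨ ∃ m, d.get? x = some m) →
    ∃ m, (l.foldl (fun st x => (st.1.insert x st.2, st.2 + 1)) (d, c)).1.get? x = some m := by
  intro l
  induction l with
  | nil =>
      intro d c x h
      rcases h with h | h
      · simp at h
      · simpa using h
  | cons y l ih =>
      intro d c x h
      simp only [List.foldl_cons]
      apply ih (d.insert y c) (c + 1) x
      rcases h with h | h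
      · rcases List.mem_cons.mp h with h | h
        · right
          refine ⟨c, ?_⟩
          rw [h, PySem.Dict.get?_insert, if_pos rfl]
        · left; exact h
      · obtain ⟨m, hm⟩ := h
        by_cases hxy : x = y
        · right
          exact ⟨c, by rw [hxy, PySem.Dict.get?_insert, if_pos rfl]⟩
        · right
          exact ⟨m, by rw [PySem.Dict.get?_insert, if_neg hxy]; exact hm⟩

theorem pvLook_lt {nodes : List Int} {x : Int} (hx : x ∈ nodes) :
    pvLook (pvIdx nodes) x < nodes.length := by
  obtain ⟨m, hm⟩ := pvIdx_fold_mem nodes PySem.Dict.empty 0 x (Or.inl hx)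
  have hlt := pvIdx_fold_lt nodes PySem.Dict.empty 0 (by intro k m' h; simp at h) x m hm
  rw [pvLook, pvIdx, hm]
  simpa using hlt

-- canonical forms of the two counting passes
def cntF (n : Nat) (key : Nat → Nat) (c : Nat → Prop) [DecidablePred c] : List Int :=
  (List.range n).foldl (fun rg i => if c i then rg.set (key i) (rg.getD (key i) 0 + 1) else rg)
    (List.replicate n 0)

def totF (n : Nat) (key : Nat → Nat) (cnt : List Int) : Int :=
  (List.range n).foldl (fun a i => if key i ≠ i then a else if cnt.getD i 0 = 1 then a + 1 else a) 0

theorem getD_replicate_zero {n i : Nat} (h : i < n) : (List.replicate n (0 : Int)).getD i 0 = 0 := by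
  simp [List.getD_eq_getElem?_getD, List.getElem?_replicate, h]

theorem cntF_getD {n : Nat} (key : Nat → Nat) (c : Nat → Prop) [DecidablePred c]
    (hkey : ∀ i, i < n → key i < n) {t : Nat} (ht : t < n) :
    (cntF n key c).getD t 0
      = (((List.range n).filter (fun j => decide (c j) && (key j == t))).length : Int) := by
  rw [cntF, count_fold_getD key c (List.range n) (List.replicate n 0) t (by simpa using ht)
    (fun j hj => by simpa using hkey j (List.mem_range.mp hj)), getD_replicate_zero ht]
  ring

theorem filter_bool_prop (n : Nat) (c : Nat → Prop) [DecidablePred c] (key : Nat → Nat) (t : Nat) :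
    Finset.filter (fun j => (decide (c j) && (key j == t)) = true) (Finset.range n)
      = Finset.filter (fun j => c j ∧ key j = t) (Finset.range n) := by
  apply Finset.filter_congr
  intro j _
  simp

theorem cntF_getD_card {n : Nat} (key : Nat → Nat) (c : Nat → Prop) [DecidablePred c]
    (hkey : ∀ i, i < n → key i < n) {t : Nat} (ht : t < n) :
    (cntF n key c).getD t 0
      = ((Finset.filter (fun j => c j ∧ key j = t) (Finset.range n)).card : Int) := by
  rw [cntF_getD key c hkey ht, filter_range_card, filter_bool_prop]

theorem tot_eq_card {n : Nat} (key : Nat → Nat) (c : Nat → Prop) [DecidablePred c]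
    (hkey : ∀ i, i < n → key i < n) :
    totF n key (cntF n key c)
      = ((Finset.filter (fun i => key i = i ∧
          (Finset.filter (fun j => c j ∧ key j = i) (Finset.range n)).card = 1)
          (Finset.range n)).card : Int) := by
  rw [totF, skip_fold_count (fun i => key i ≠ i) (fun i => (cntF n key c).getD i 0 = 1)
    (List.range n) 0, zero_add]
  congr 1
  rw [filter_range_card]
  congr 1
  apply Finset.filter_congr
  intro i hi
  have hin : i < n := Finset.mem_range.mp hi
  rw [cntF_getD_card key c hkey hin]
  simp only [Bool.and_eq_true, Bool.not_eq_true', decide_eq_false_iff_not, not_not,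
    decide_eq_true_eq]
  constructor
  · rintro ⟨h1, h2⟩; exact ⟨h1, by exact_mod_cast h2⟩
  · rintro ⟨h1, h2⟩; exact ⟨h1, by exact_mod_cast h2⟩

-- ===== VERDICT (by name: the statement is the Claim_ definition above) =====
theorem getD_range {n i : Nat} (h : i < n) : (List.range n).getD i 0 = i := by
  simp [List.getD_eq_getElem?_getD, List.getElem?_range, h]

theorem solution_spec : Claim_equal_solution := by
  intro nodes edges _ hpre
  unfold Spec_solution
  have hval : ∀ e ∈ edges,
      pvLook (pvIdx nodes) e.1 < nodes.length ∧ pvLook (pvIdx nodes) e.2 < nodes.length :=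
    fun e he => ⟨pvLook_lt (hpre e he).1, pvLook_lt (hpre e he).2⟩
  have hg0 : Good (List.range nodes.length) nodes.length := by
    refine ⟨List.length_range, ?_, ?_⟩
    · intro i hi; rw [stepP, getD_range hi]; exact hi
    · intro i hi; exact ⟨i, 0, Rt.root i (by rw [stepP, getD_range hi])⟩
  have hlab0 : ∀ i, i < nodes.length → (List.range nodes.length).getD i 0 < nodes.length ∧
      (List.range nodes.length).getD ((List.range nodes.length).getD i 0) 0
        = (List.range nodes.length).getD i 0 := by
    intro i hi
    rw [getD_range hi]
    exact ⟨hi, by rw [getD_range hi]⟩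
  have hroots0 : ∀ i, i < nodes.length → RtE (List.range nodes.length) i (id i) := by
    intro i hi
    exact ⟨0, Rt.root i (by rw [stepP, getD_range hi])⟩
  have hiff0 : ∀ i j, i < nodes.length → j < nodes.length →
      (id i = id j ↔ (List.range nodes.length).getD i 0 = (List.range nodes.length).getD j 0) := by
    intro i j hi hj
    rw [getD_range hi, getD_range hj]
    exact Iff.rfl
  obtain ⟨ρ, hgA, hlenF, hfixF, hrootsF, hiffF⟩ :=
    phase2 (n := nodes.length) (pvIdx nodes) edges (List.range nodes.length)
      (List.range nodes.length) id hg0 List.length_range hlab0 hroots0 hiff0 hval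
  -- representative-map facts for ρ
  have hρlt : ∀ i, i < nodes.length → ρ i < nodes.length := by
    intro i hi
    obtain ⟨k, hk⟩ := hrootsF i hi
    exact Rt_lt hgA.2.1 hi hk
  have hρfix : ∀ i, i < nodes.length → ρ (ρ i) = ρ i := by
    intro i hi
    obtain ⟨k, hk⟩ := hrootsF i hi
    exact RtE_fun (hrootsF (ρ i) (hρlt i hi)) ⟨0, Rt.root _ (Rt_fix hk)⟩
  -- A-side: the tally pass and the final pass reduce to pure folds over ρ
  obtain ⟨hg4, hroots4, h42⟩ := phase4 (n := nodes.length) (fun i => PySem.Int.mod (nodes.getD i 0) 2 = PySem.Int.mod ((pvDegrees (pvIdx nodes) nodes.length edges).getD i 0) 2) ρ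
    (List.range nodes.length) (pvUnions (pvIdx nodes) nodes.length edges)
    (List.replicate nodes.length 0) (List.replicate nodes.length 0)
    hgA hrootsF (fun i hi => List.mem_range.mp hi)
  have hng : (List.range nodes.length).foldl
      (fun ng i => if PySem.Int.mod (nodes.getD i 0) 2 = PySem.Int.mod ((pvDegrees (pvIdx nodes) nodes.length edges).getD i 0) 2
        then ng else ng.set (ρ i) (ng.getD (ρ i) 0 + 1)) (List.replicate nodes.length 0)
      = (cntF nodes.length ρ (fun i => ¬ PySem.Int.mod (nodes.getD i 0) 2 = PySem.Int.mod ((pvDegrees (pvIdx nodes) nodes.length edges).getD i 0) 2)) := by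
    rw [show (fun (ng : List Int) i =>
          if PySem.Int.mod (nodes.getD i 0) 2 = PySem.Int.mod ((pvDegrees (pvIdx nodes) nodes.length edges).getD i 0) 2
          then ng else ng.set (ρ i) (ng.getD (ρ i) 0 + 1))
        = (fun (ng : List Int) i =>
          if ¬ PySem.Int.mod (nodes.getD i 0) 2 = PySem.Int.mod ((pvDegrees (pvIdx nodes) nodes.length edges).getD i 0) 2
          then ng.set (ρ i) (ng.getD (ρ i) 0 + 1) else ng) from
      funext fun ng => funext fun i => by
        by_cases h : PySem.Int.mod (nodes.getD i 0) 2 = PySem.Int.mod ((pvDegrees (pvIdx nodes) nodes.length edges).getD i 0) 2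
        · rw [if_pos h, if_neg (not_not_intro h)]
        · rw [if_neg h, if_pos h]]
    rfl
  have e42 : (pvTally nodes (pvDegrees (pvIdx nodes) nodes.length edges) nodes.length (pvUnions (pvIdx nodes) nodes.length edges)).2 = ((cntF nodes.length ρ (fun i => PySem.Int.mod (nodes.getD i 0) 2 = PySem.Int.mod ((pvDegrees (pvIdx nodes) nodes.length edges).getD i 0) 2)), (cntF nodes.length ρ (fun i => ¬ PySem.Int.mod (nodes.getD i 0) 2 = PySem.Int.mod ((pvDegrees (pvIdx nodes) nodes.length edges).getD i 0) 2))) := by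
    rw [← hng]
    exact h42
  have e5 : (pvCollect nodes.length (cntF nodes.length ρ (fun i => PySem.Int.mod (nodes.getD i 0) 2 = PySem.Int.mod ((pvDegrees (pvIdx nodes) nodes.length edges).getD i 0) 2)) (cntF nodes.length ρ (fun i => ¬ PySem.Int.mod (nodes.getD i 0) 2 = PySem.Int.mod ((pvDegrees (pvIdx nodes) nodes.length edges).getD i 0) 2)) (pvTally nodes (pvDegrees (pvIdx nodes) nodes.length edges) nodes.length (pvUnions (pvIdx nodes) nodes.length edges)).1).2
      = (totF nodes.length ρ (cntF nodes.length ρ (fun i => PySem.Int.mod (nodes.getD i 0) 2 = PySem.Int.mod ((pvDegrees (pvIdx nodes) nodes.length edges).getD i 0) 2)), totF nodes.length ρ (cntF nodes.length ρ (fun i => ¬ PySem.Int.mod (nodes.getD i 0) 2 = PySem.Int.mod ((pvDegrees (pvIdx nodes) nodes.length edges).getD i 0) 2))) :=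
    phase5 (n := nodes.length) (cntF nodes.length ρ (fun i => PySem.Int.mod (nodes.getD i 0) 2 = PySem.Int.mod ((pvDegrees (pvIdx nodes) nodes.length edges).getD i 0) 2)) (cntF nodes.length ρ (fun i => ¬ PySem.Int.mod (nodes.getD i 0) 2 = PySem.Int.mod ((pvDegrees (pvIdx nodes) nodes.length edges).getD i 0) 2)) ρ (List.range nodes.length) (pvTally nodes (pvDegrees (pvIdx nodes) nodes.length edges) nodes.length (pvUnions (pvIdx nodes) nodes.length edges)).1 0 0
      hg4 hroots4 (fun i hi => List.mem_range.mp hi)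
  -- B-side: split the fused edge pass, then normalise the two counting passes
  have hsplitB : pvMerge (pvIdx nodes) nodes.length edges = ((pvDegrees (pvIdx nodes) nodes.length edges), (edges.foldl (labStep (pvIdx nodes)) (List.range nodes.length))) := by
    unfold pvMerge pvDegrees
    apply foldl_pair_split
    intro a b x
    rfl
  have eCount : pvCount nodes (pvDegrees (pvIdx nodes) nodes.length edges) (edges.foldl (labStep (pvIdx nodes)) (List.range nodes.length)) nodes.length
      = ((cntF nodes.length (fun i => (edges.foldl (labStep (pvIdx nodes)) (List.range nodes.length)).getD i 0) (fun i => PySem.Int.mod (nodes.getD i 0) 2 = PySem.Int.mod ((pvDegrees (pvIdx nodes) nodes.length edges).getD i 0) 2)), (List.range nodes.length).foldl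
          (fun c2 i => if PySem.Int.mod (nodes.getD i 0) 2 = PySem.Int.mod ((pvDegrees (pvIdx nodes) nodes.length edges).getD i 0) 2
            then c2 else c2.set ((edges.foldl (labStep (pvIdx nodes)) (List.range nodes.length)).getD i 0) (c2.getD ((edges.foldl (labStep (pvIdx nodes)) (List.range nodes.length)).getD i 0) 0 + 1))
          (List.replicate nodes.length 0)) := by
    unfold pvCount cntF
    apply foldl_pair_split
    intro a b x
    by_cases h : PySem.Int.mod (nodes.getD x 0) 2 = PySem.Int.mod ((pvDegrees (pvIdx nodes) nodes.length edges).getD x 0) 2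
    · rw [if_pos h, if_pos h, if_pos h]
    · rw [if_neg h, if_neg h, if_neg h]
  have hngB : (List.range nodes.length).foldl
      (fun c2 i => if PySem.Int.mod (nodes.getD i 0) 2 = PySem.Int.mod ((pvDegrees (pvIdx nodes) nodes.length edges).getD i 0) 2
        then c2 else c2.set ((edges.foldl (labStep (pvIdx nodes)) (List.range nodes.length)).getD i 0) (c2.getD ((edges.foldl (labStep (pvIdx nodes)) (List.range nodes.length)).getD i 0) 0 + 1))
      (List.replicate nodes.length 0) = (cntF nodes.length (fun i => (edges.foldl (labStep (pvIdx nodes)) (List.range nodes.length)).getD i 0) (fun i => ¬ PySem.Int.mod (nodes.getD i 0) 2 = PySem.Int.mod ((pvDegrees (pvIdx nodes) nodes.length edges).getD i 0) 2)) := by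
    rw [show (fun (c2 : List Int) i =>
          if PySem.Int.mod (nodes.getD i 0) 2 = PySem.Int.mod ((pvDegrees (pvIdx nodes) nodes.length edges).getD i 0) 2
          then c2 else c2.set ((edges.foldl (labStep (pvIdx nodes)) (List.range nodes.length)).getD i 0) (c2.getD ((edges.foldl (labStep (pvIdx nodes)) (List.range nodes.length)).getD i 0) 0 + 1))
        = (fun (c2 : List Int) i =>
          if ¬ PySem.Int.mod (nodes.getD i 0) 2 = PySem.Int.mod ((pvDegrees (pvIdx nodes) nodes.length edges).getD i 0) 2
          then c2.set ((edges.foldl (labStep (pvIdx nodes)) (List.range nodes.length)).getD i 0) (c2.getD ((edges.foldl (labStep (pvIdx nodes)) (List.range nodes.length)).getD i 0) 0 + 1) else c2) from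
      funext fun c2 => funext fun i => by
        by_cases h : PySem.Int.mod (nodes.getD i 0) 2 = PySem.Int.mod ((pvDegrees (pvIdx nodes) nodes.length edges).getD i 0) 2
        · rw [if_pos h, if_neg (not_not_intro h)]
        · rw [if_neg h, if_pos h]]
    rfl
  rw [hngB] at eCount
  have eFin : ∀ c1 c2 : List Int, pvFinish (edges.foldl (labStep (pvIdx nodes)) (List.range nodes.length)) c1 c2 nodes.length
      = (totF nodes.length (fun i => (edges.foldl (labStep (pvIdx nodes)) (List.range nodes.length)).getD i 0) c1, totF nodes.length (fun i => (edges.foldl (labStep (pvIdx nodes)) (List.range nodes.length)).getD i 0) c2) := by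
    intro c1 c2
    unfold pvFinish totF
    apply foldl_pair_split
    intro a b x
    by_cases h : (edges.foldl (labStep (pvIdx nodes)) (List.range nodes.length)).getD x 0 = x
    · rw [if_pos h, if_neg (not_not_intro h), if_neg (not_not_intro h)]
    · rw [if_neg h, if_pos h, if_pos h]
  -- assemble
  simp only [solution, solution_alt]
  rw [e42]
  have egoal : (pvCollect nodes.length ((cntF nodes.length ρ (fun i => PySem.Int.mod (nodes.getD i 0) 2 = PySem.Int.mod ((pvDegrees (pvIdx nodes) nodes.length edges).getD i 0) 2)), (cntF nodes.length ρ (fun i => ¬ PySem.Int.mod (nodes.getD i 0) 2 = PySem.Int.mod ((pvDegrees (pvIdx nodes) nodes.length edges).getD i 0) 2))).1 ((cntF nodes.length ρ (fun i => PySem.Int.mod (nodes.getD i 0) 2 = PySem.Int.mod ((pvDegrees (pvIdx nodes) nodes.length edges).getD i 0) 2)), (cntF nodes.length ρ (fun i => ¬ PySem.Int.mod (nodes.getD i 0) 2 = PySem.Int.mod ((pvDegrees (pvIdx nodes) nodes.length edges).getD i 0) 2))).2 (pvTally nodes (pvDegrees (pvIdx nodes) nodes.length edges) nodes.length (pvUnions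 (pvIdx nodes) nodes.length edges)).1).2
      = (totF nodes.length ρ (cntF nodes.length ρ (fun i => PySem.Int.mod (nodes.getD i 0) 2 = PySem.Int.mod ((pvDegrees (pvIdx nodes) nodes.length edges).getD i 0) 2)), totF nodes.length ρ (cntF nodes.length ρ (fun i => ¬ PySem.Int.mod (nodes.getD i 0) 2 = PySem.Int.mod ((pvDegrees (pvIdx nodes) nodes.length edges).getD i 0) 2))) := e5
  rw [egoal, hsplitB]
  have ecnt : pvCount nodes ((pvDegrees (pvIdx nodes) nodes.length edges), (edges.foldl (labStep (pvIdx nodes)) (List.range nodes.length))).1 ((pvDegrees (pvIdx nodes) nodes.length edges), (edges.foldl (labStep (pvIdx nodes)) (List.range nodes.length))).2 nodes.length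
      = ((cntF nodes.length (fun i => (edges.foldl (labStep (pvIdx nodes)) (List.range nodes.length)).getD i 0) (fun i => PySem.Int.mod (nodes.getD i 0) 2 = PySem.Int.mod ((pvDegrees (pvIdx nodes) nodes.length edges).getD i 0) 2)), (cntF nodes.length (fun i => (edges.foldl (labStep (pvIdx nodes)) (List.range nodes.length)).getD i 0) (fun i => ¬ PySem.Int.mod (nodes.getD i 0) 2 = PySem.Int.mod ((pvDegrees (pvIdx nodes) nodes.length edges).getD i 0) 2))) := eCount
  rw [ecnt]
  have efin2 : pvFinish ((pvDegrees (pvIdx nodes) nodes.length edges), (edges.foldl (labStep (pvIdx nodes)) (List.range nodes.length))).2 ((cntF nodes.length (fun i => (edges.foldl (labStep (pvIdx nodes)) (List.range nodes.length)).getD i 0) (fun i => PySem.Int.mod (nodes.getD i 0) 2 = PySem.Int.mod ((pvDegrees (pvIdx nodes) nodes.length edges).getD i 0) 2)), (cntF nodes.length (fun i => (edges.foldl (labStep (pvIdx nodes)) (List.range nodes.length)).getD i 0) (fun i => ¬ PySem.Int.mod (nodes.getD i 0) 2 = PySem.Int.mod ((pvDegrees (pvIdx nodes) nodes.length edges).getD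 i 0) 2))).1 ((cntF nodes.length (fun i => (edges.foldl (labStep (pvIdx nodes)) (List.range nodes.length)).getD i 0) (fun i => PySem.Int.mod (nodes.getD i 0) 2 = PySem.Int.mod ((pvDegrees (pvIdx nodes) nodes.length edges).getD i 0) 2)), (cntF nodes.length (fun i => (edges.foldl (labStep (pvIdx nodes)) (List.range nodes.length)).getD i 0) (fun i => ¬ PySem.Int.mod (nodes.getD i 0) 2 = PySem.Int.mod ((pvDegrees (pvIdx nodes) nodes.length edges).getD i 0) 2))).2 nodes.length
      = (totF nodes.length (fun i => (edges.foldl (labStep (pvIdx nodes)) (List.range nodes.length)).getD i 0) (cntF nodes.length (fun i => (edges.foldl (labStep (pvIdx nodes)) (List.range nodes.length)).getD i 0) (fun i => PySem.Int.mod (nodes.getD i 0) 2 = PySem.Int.mod ((pvDegrees (pvIdx nodes) nodes.length edges).getD i 0) 2)), totF nodes.length (fun i => (edges.foldl (labStep (pvIdx nodes)) (List.range nodes.length)).getD i 0) (cntF nodes.length (fun i => (edges.foldl (labStep (pvIdx nodes)) (List.range nodes.length)).getD i 0) (fun i => ¬ PySem.Int.mod (nodes.getD i 0) 2 = PySem.Int.mod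 ((pvDegrees (pvIdx nodes) nodes.length edges).getD i 0) 2))) := eFin (cntF nodes.length (fun i => (edges.foldl (labStep (pvIdx nodes)) (List.range nodes.length)).getD i 0) (fun i => PySem.Int.mod (nodes.getD i 0) 2 = PySem.Int.mod ((pvDegrees (pvIdx nodes) nodes.length edges).getD i 0) 2)) (cntF nodes.length (fun i => (edges.foldl (labStep (pvIdx nodes)) (List.range nodes.length)).getD i 0) (fun i => ¬ PySem.Int.mod (nodes.getD i 0) 2 = PySem.Int.mod ((pvDegrees (pvIdx nodes) nodes.length edges).getD i 0) 2))
  rw [efin2]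
  have hlablt : ∀ i, i < nodes.length → (fun i => (edges.foldl (labStep (pvIdx nodes)) (List.range nodes.length)).getD i 0) i < nodes.length := fun i hi => (hfixF i hi).1
  have hlabfix : ∀ i, i < nodes.length → (fun i => (edges.foldl (labStep (pvIdx nodes)) (List.range nodes.length)).getD i 0) ((fun i => (edges.foldl (labStep (pvIdx nodes)) (List.range nodes.length)).getD i 0) i) = (fun i => (edges.foldl (labStep (pvIdx nodes)) (List.range nodes.length)).getD i 0) i := fun i hi => (hfixF i hi).2
  rw [tot_eq_card ρ (fun i => PySem.Int.mod (nodes.getD i 0) 2 = PySem.Int.mod ((pvDegrees (pvIdx nodes) nodes.length edges).getD i 0) 2) hρlt, tot_eq_card ρ (fun i => ¬ PySem.Int.mod (nodes.getD i 0) 2 = PySem.Int.mod ((pvDegrees (pvIdx nodes) nodes.length edges).getD i 0) 2) hρlt,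
    tot_eq_card (fun i => (edges.foldl (labStep (pvIdx nodes)) (List.range nodes.length)).getD i 0) (fun i => PySem.Int.mod (nodes.getD i 0) 2 = PySem.Int.mod ((pvDegrees (pvIdx nodes) nodes.length edges).getD i 0) 2) hlablt, tot_eq_card (fun i => (edges.foldl (labStep (pvIdx nodes)) (List.range nodes.length)).getD i 0) (fun i => ¬ PySem.Int.mod (nodes.getD i 0) 2 = PySem.Int.mod ((pvDegrees (pvIdx nodes) nodes.length edges).getD i 0) 2) hlablt,
    rep_card_eq ρ (fun i => (edges.foldl (labStep (pvIdx nodes)) (List.range nodes.length)).getD i 0) (fun i => PySem.Int.mod (nodes.getD i 0) 2 = PySem.Int.mod ((pvDegrees (pvIdx nodes) nodes.length edges).getD i 0) 2) hρlt hlablt hρfix hlabfix hiffF,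
    rep_card_eq ρ (fun i => (edges.foldl (labStep (pvIdx nodes)) (List.range nodes.length)).getD i 0) (fun i => ¬ PySem.Int.mod (nodes.getD i 0) 2 = PySem.Int.mod ((pvDegrees (pvIdx nodes) nodes.length edges).getD i 0) 2) hρlt hlablt hρfix hlabfix hiffF]
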